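-- pv_equiv track=rewrite | github.com/sihohan/algorithm | 프로그래머스/2/12941. 최솟값 만들기/최솟값 만들기.py | solution
-- ===== SOURCE A (Python) =====
-- def solution(A,B):
--     answer = 0
--     A.sort()
--     B.sort()
--     while A:
--         min_ = A.pop(0)
--         max_ = B.pop(-1)
--         answer += (min_ * max_)
--
--     return answer
-- ===== SOURCE B (Python) =====
-- def solution(A, B):
--     return sum(a * b for a, b in zip(sorted(A), sorted(B, reverse=True)))
-- ===== Notes on version B (the rewrite author's own statement) =====
-- stated objective: faster
-- what changed: Replaced the destructive while-loop that repeatedly pops A's head and B's tail from the sorted lists with a single pass summing products over zip(sorted(A), sorted(B, reverse=True)); B does not mutate its arguments.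
import Mathlib
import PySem

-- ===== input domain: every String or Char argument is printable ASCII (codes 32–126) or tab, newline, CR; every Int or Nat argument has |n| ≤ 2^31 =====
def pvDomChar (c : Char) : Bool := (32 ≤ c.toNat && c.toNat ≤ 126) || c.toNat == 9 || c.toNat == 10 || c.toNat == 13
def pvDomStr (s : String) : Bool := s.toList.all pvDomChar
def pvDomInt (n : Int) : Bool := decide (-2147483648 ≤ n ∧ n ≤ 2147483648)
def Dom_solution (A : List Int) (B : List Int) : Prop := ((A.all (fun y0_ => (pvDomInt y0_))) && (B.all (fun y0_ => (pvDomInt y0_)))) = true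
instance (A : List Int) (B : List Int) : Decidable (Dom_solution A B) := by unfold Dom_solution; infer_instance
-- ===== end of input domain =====

-- B replaces A's quadratic destructive pop-loop with one pass over zip of the two sorts (faster per
-- a timing run); equivalence is about the RETURN value only — Python A sorts and empties its
-- argument lists in place, B leaves them untouched.

-- ===== PORT A =====
-- while A: min_ = A.pop(0); max_ = B.pop(-1); answer += min_ * max_
def solutionLoop : List Int → List Int → Int → Int
  | [], _, answer => answer
  | min_ :: A', B, answer =>
    match PySem.List.pop? B with          -- B.pop(-1); none = IndexError, excluded by Pre_
    | some (max_, B') => solutionLoop A' B' (answer + min_ * max_)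
    | none => answer + min_ * 0           -- unreachable under Pre_solution

def solution (A : List Int) (B : List Int) : Int :=
  solutionLoop (PySem.List.sorted A (fun x => x) false) (PySem.List.sorted B (fun x => x) false) 0

-- ===== PORT B =====
def solution_alt (A : List Int) (B : List Int) : Int :=
  (((PySem.List.sorted A (fun x => x) false).zip
    (PySem.List.sorted B (fun x => x) true))).foldl (fun acc p => acc + p.1 * p.2) 0

-- ===== PRECONDITION & SPEC =====
-- Pre_ excludes exactly the inputs with len(B) < len(A), on which A raises IndexError (B.pop(-1) on empty B).
def Pre_solution (A : List Int) (B : List Int) : Prop := A.length ≤ B.length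
instance (A : List Int) (B : List Int) : Decidable (Pre_solution A B) := by unfold Pre_solution; infer_instance
def pvWitness_solution : List Int × List Int := ([3, 1, 2], [4, 0, 6])

def Spec_solution (A : List Int) (B : List Int) (out : Int) : Prop := out = solution_alt A B
instance (A : List Int) (B : List Int) (out : Int) : Decidable (Spec_solution A B out) := by unfold Spec_solution; infer_instance

-- ===== CLAIM (what is proved, stated in full; the proofs are below) =====
def Claim_equal_solution : Prop := ∀ (A : List Int) (B : List Int), Dom_solution A B → Pre_solution A B → Spec_solution A B (solution A B)

-- ===== LEMMAS AND PROOFS =====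

-- The loop popping B's last element equals a fold over the zip with B reversed.
theorem solutionLoop_eq_foldl_zip_reverse (sa sb : List Int) (acc : Int)
    (h : sa.length ≤ sb.length) :
    solutionLoop sa sb acc = (sa.zip sb.reverse).foldl (fun acc p => acc + p.1 * p.2) acc := by
  induction sa generalizing sb acc with
  | nil => simp [solutionLoop]
  | cons a sa' ih =>
    rcases sb.eq_nil_or_concat with rfl | ⟨ys, y, rfl⟩
    · simp at h
    · have hlen : sa'.length ≤ ys.length := by
        simpa using Nat.lt_succ_iff.mp (by simpa using h)
      simp [solutionLoop, PySem.List.pop?_last, ih ys _ hlen, List.zip]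

-- sorted(xs, reverse=True) with the identity key is the reverse of sorted(xs).
theorem sorted_rev_eq_reverse_sorted (xs : List Int) :
    PySem.List.sorted xs (fun x => x) true = (PySem.List.sorted xs (fun x => x) false).reverse := by
  apply List.eq_of_perm_of_sorted (le := fun a b : Int => b ≤ a)
  · intro a b _ _ h1 h2; omega
  · exact PySem.List.sorted_pairwise_rev xs _
  · simpa [List.pairwise_reverse] using PySem.List.sorted_pairwise xs (fun x => x)
  · exact (PySem.List.sorted_perm xs _ true).trans
      ((List.reverse_perm _).trans (PySem.List.sorted_perm xs _ false)).symm

-- ===== VERDICT (by name: the statement is the Claim_ definition above) =====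
theorem solution_spec : Claim_equal_solution := by
  intro A B _ hpre
  unfold Spec_solution solution solution_alt
  rw [sorted_rev_eq_reverse_sorted]
  exact solutionLoop_eq_foldl_zip_reverse _ _ 0
    (by simpa [PySem.List.length_sorted] using hpre)
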